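-- pv_equiv track=rewrite | github.com/danielsddd/NLP-project | recipe_project/src/preprocessing/prepare_data.py | _map_collapsed_to_orig
-- ===== SOURCE A (Python) =====
-- def _map_collapsed_to_orig(original, collapsed_pos):
--     """Map a position in whitespace-collapsed text back to the original.
--
--     Walks through original, counting collapsed positions. Consecutive
--     whitespace chars in original all map to a single position in collapsed.
--     """
--     collapsed_idx = 0
--     in_whitespace = False
--     for orig_idx, ch in enumerate(original):
--         if ch in ' \t\n\r\u00a0':
--             if not in_whitespace:
--                 if collapsed_idx == collapsed_pos:
--                     return orig_idx
--                 collapsed_idx += 1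
--                 in_whitespace = True
--             # Subsequent whitespace chars → skip (collapsed away)
--         else:
--             in_whitespace = False
--             if collapsed_idx == collapsed_pos:
--                 return orig_idx
--             collapsed_idx += 1
--     return len(original) - 1
-- ===== SOURCE B (Python) =====
-- def _map_collapsed_to_orig(original, collapsed_pos):
--     """Prefix-sum + binary-search reformulation.
--
--     pref[k] = number of collapsed positions contributed by original[:k]
--     (a char is collapsed away iff it is whitespace preceded by whitespace;
--     this is a stateless predicate on (prev, ch) pairs, no run flag).
--     The answer for an in-range query is the smallest original index i with
--     pref[i + 1] >= collapsed_pos + 1, found by binary search on the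
--     monotone prefix array.
--     """
--     WS = ' \t\n\r\u00a0'
--     n = len(original)
--     pref = [0]
--     acc = 0
--     for prev, ch in zip('\x00' + original, original):
--         acc += 0 if (ch in WS and prev in WS) else 1
--         pref.append(acc)
--     if not (0 <= collapsed_pos < pref[n]):
--         return n - 1
--     lo, hi = 0, n - 1
--     while lo < hi:
--         mid = (lo + hi) // 2
--         if pref[mid + 1] >= collapsed_pos + 1:
--             hi = mid
--         else:
--             lo = mid + 1
--     return lo
-- ===== Notes on version B (the rewrite author's own statement) =====
-- stated objective: alternative
-- what changed: A scans left-to-right with a run flag and returns early when a running collapsed-index counter hits the target; B computes a monotone prefix-sum array of collapsed positions using a stateless predecessor-pair predicate and answers the query by binary-searching that array for the smallest index whose prefix count exceeds the target.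
import Mathlib
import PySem

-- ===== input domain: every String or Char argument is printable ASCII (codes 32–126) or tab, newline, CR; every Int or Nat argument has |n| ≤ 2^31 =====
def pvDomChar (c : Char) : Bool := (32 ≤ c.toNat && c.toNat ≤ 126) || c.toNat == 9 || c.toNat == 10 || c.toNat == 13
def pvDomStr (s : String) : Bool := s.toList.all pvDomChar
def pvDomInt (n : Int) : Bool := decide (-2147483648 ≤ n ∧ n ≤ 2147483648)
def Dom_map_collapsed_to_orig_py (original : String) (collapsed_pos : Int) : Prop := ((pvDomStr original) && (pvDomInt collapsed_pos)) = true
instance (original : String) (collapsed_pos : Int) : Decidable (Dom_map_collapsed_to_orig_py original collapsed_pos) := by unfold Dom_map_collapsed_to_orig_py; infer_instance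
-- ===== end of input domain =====

-- B replaces A's early-return scan (run flag + running collapsed counter) by a prefix-sum
-- array of collapsed positions (stateless predecessor-pair predicate) queried by binary search.

-- whitespace test used by both Pythons: ch in ' \t\n\r\u00a0'
def pvIsWS (c : Char) : Bool := c = ' ' || c = '\t' || c = '\n' || c = '\r' || c = Char.ofNat 160

-- ===== PORT A =====
-- A's loop: orig_idx / collapsed_idx / in_whitespace carried as state; early return = some
def pvALoop : List Char → Int → Int → Bool → Int → Option Int
  | [], _, _, _, _ => none
  | ch :: rest, oi, ci, inws, pos =>
    if pvIsWS ch then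
      if !inws then
        (if ci = pos then some oi else pvALoop rest (oi + 1) (ci + 1) true pos)
      else pvALoop rest (oi + 1) ci inws pos
    else
      (if ci = pos then some oi else pvALoop rest (oi + 1) (ci + 1) false pos)

def map_collapsed_to_orig_py (original : String) (collapsed_pos : Int) : Int :=
  match pvALoop original.toList 0 0 false collapsed_pos with
  | some i => i
  | none => (original.toList.length : Int) - 1

-- ===== PORT B =====
-- B's pref-building loop over zip('\x00'+original, original): running sum appended per char
def pvPrefLoop : List (Char × Char) → Int → List Int
  | [], _ => []
  | (prev, ch) :: rest, acc =>
      let acc' := acc + (if pvIsWS ch && pvIsWS prev then 0 else 1)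
      acc' :: pvPrefLoop rest acc'

-- B's while lo < hi binary search on the prefix array
def pvBSearch (pref : List Int) (target : Int) (lo hi : Nat) : Nat :=
  if lo < hi then
    let mid := (lo + hi) / 2
    if target ≤ pref.getD (mid + 1) 0 then pvBSearch pref target lo mid
    else pvBSearch pref target (mid + 1) hi
  else lo
termination_by hi - lo
decreasing_by all_goals omega

def map_collapsed_to_orig_py_alt (original : String) (collapsed_pos : Int) : Int :=
  let cs := original.toList
  let n := cs.length
  let pref : List Int := 0 :: pvPrefLoop ((Char.ofNat 0 :: cs).zip cs) 0
  if 0 ≤ collapsed_pos ∧ collapsed_pos < pref.getD n 0 then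
    (pvBSearch pref (collapsed_pos + 1) 0 (n - 1) : Int)
  else (n : Int) - 1

-- ===== PRECONDITION & SPEC =====
def Spec_map_collapsed_to_orig_py (original : String) (collapsed_pos : Int) (out : Int) : Prop := out = map_collapsed_to_orig_py_alt original collapsed_pos
instance (original : String) (collapsed_pos : Int) (out : Int) : Decidable (Spec_map_collapsed_to_orig_py original collapsed_pos out) := by unfold Spec_map_collapsed_to_orig_py; infer_instance

-- ===== CLAIM (what is proved, stated in full; the proofs are below) =====
def Claim_equal_map_collapsed_to_orig_py : Prop := ∀ (original : String) (collapsed_pos : Int), Dom_map_collapsed_to_orig_py original collapsed_pos → Spec_map_collapsed_to_orig_py original collapsed_pos (map_collapsed_to_orig_py original collapsed_pos)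

-- ===== LEMMAS AND PROOFS =====

-- proof-only reference table: the collapsed→original position list (neither port computes it)
def pvBuildMap : List Char → Int → Bool → List Int
  | [], _, _ => []
  | ch :: rest, i, inws =>
    if pvIsWS ch then
      (if inws then pvBuildMap rest (i + 1) true else i :: pvBuildMap rest (i + 1) true)
    else i :: pvBuildMap rest (i + 1) false

-- A's scan from counter ci finds exactly the (pos-ci)-th entry of the table (none if out of range)
theorem pvALoop_eq_getElem (cs : List Char) : ∀ (oi ci : Int) (inws : Bool) (pos : Int),
    pvALoop cs oi ci inws pos =
      (if 0 ≤ pos - ci then (pvBuildMap cs oi inws)[(pos - ci).toNat]? else none) := by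
  induction cs with
  | nil =>
      intro oi ci inws pos
      simp [pvALoop, pvBuildMap]
  | cons ch rest ih =>
      intro oi ci inws pos
      by_cases hws : pvIsWS ch = true
      · cases inws with
        | true =>
            simp only [pvALoop, pvBuildMap, hws, if_pos, Bool.not_true, if_false, Bool.false_eq_true]
            exact ih (oi + 1) ci true pos
        | false =>
            simp only [pvALoop, pvBuildMap, hws, if_pos, Bool.not_false, Bool.false_eq_true, if_false]
            by_cases hpc : ci = pos
            · subst hpc
              simp
            · rw [if_neg hpc, ih (oi + 1) (ci + 1) true pos]
              by_cases h0 : 0 ≤ pos - ci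
              · have h1 : 0 ≤ pos - (ci + 1) := by omega
                have h2 : (pos - ci).toNat = (pos - (ci + 1)).toNat + 1 := by omega
                rw [if_pos h0, if_pos h1, h2]
                simp
              · have h1 : ¬ 0 ≤ pos - (ci + 1) := by omega
                rw [if_neg h0, if_neg h1]
      · simp only [pvALoop, pvBuildMap, hws, Bool.false_eq_true, if_false]
        by_cases hpc : ci = pos
        · subst hpc
          simp
        · rw [if_neg hpc, ih (oi + 1) (ci + 1) false pos]
          by_cases h0 : 0 ≤ pos - ci
          · have h1 : 0 ≤ pos - (ci + 1) := by omega
            have h2 : (pos - ci).toNat = (pos - (ci + 1)).toNat + 1 := by omega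
            rw [if_pos h0, if_pos h1, h2]
            simp
          · have h1 : ¬ 0 ≤ pos - (ci + 1) := by omega
            rw [if_neg h0, if_neg h1]

theorem pvBuildMap_lb (cs : List Char) : ∀ (oi : Int) (b : Bool) (m : Int),
    m ∈ pvBuildMap cs oi b → oi ≤ m := by
  induction cs with
  | nil => intro oi b m h; simp [pvBuildMap] at h
  | cons ch rest ih =>
      intro oi b m h
      unfold pvBuildMap at h
      split_ifs at h with h1 h2 <;>
        first
        | (exact le_of_lt (lt_of_lt_of_le (by omega) (ih (oi+1) _ m h)))
        | (rcases List.mem_cons.mp h with h' | h'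
           · omega
           · exact le_of_lt (lt_of_lt_of_le (by omega) (ih (oi+1) _ m h')))

theorem pvBuildMap_ub (cs : List Char) : ∀ (oi : Int) (b : Bool) (m : Int),
    m ∈ pvBuildMap cs oi b → m < oi + cs.length := by
  induction cs with
  | nil => intro oi b m h; simp [pvBuildMap] at h
  | cons ch rest ih =>
      intro oi b m h
      unfold pvBuildMap at h
      have step : ∀ b', m ∈ pvBuildMap rest (oi+1) b' → m < oi + (ch :: rest).length := by
        intro b' h'
        have := ih (oi+1) b' m h'
        simp only [List.length_cons]
        push_cast
        omega
      split_ifs at h with h1 h2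
      · exact step _ h
      · rcases List.mem_cons.mp h with h' | h'
        · simp only [List.length_cons]; push_cast; omega
        · exact step _ h'
      · rcases List.mem_cons.mp h with h' | h'
        · simp only [List.length_cons]; push_cast; omega
        · exact step _ h'

theorem pvBuildMap_sorted (cs : List Char) : ∀ (oi : Int) (b : Bool),
    (pvBuildMap cs oi b).Pairwise (· < ·) := by
  induction cs with
  | nil => intro oi b; simp [pvBuildMap]
  | cons ch rest ih =>
      intro oi b
      unfold pvBuildMap
      have hc : ∀ b', (oi :: pvBuildMap rest (oi+1) b').Pairwise (· < ·) := by
        intro b'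
        refine List.pairwise_cons.mpr ⟨?_, ih (oi+1) b'⟩
        intro m hm
        exact lt_of_lt_of_le (by omega) (pvBuildMap_lb rest (oi+1) b' m hm)
      split_ifs <;> first | exact ih (oi+1) true | exact hc _

-- prefix values = counts of table entries ≤ threshold
theorem pvDecideShift (oi : Int) (k : Nat) (m : Int) :
    decide (m ≤ oi + 1 + (k : Int)) = decide (m ≤ oi + ((k + 1 : Nat) : Int)) := by
  have h : oi + 1 + (k : Int) = oi + ((k + 1 : Nat) : Int) := by push_cast; ring
  rw [h]

theorem pvPrefLoop_countP (cs : List Char) : ∀ (p : Char) (acc oi : Int) (k : Nat),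
    k < cs.length →
    (pvPrefLoop ((p :: cs).zip cs) acc).getD k 0 =
      acc + ((pvBuildMap cs oi (pvIsWS p)).countP (fun m => decide (m ≤ oi + (k : Int))) : Int) := by
  induction cs with
  | nil => intro p acc oi k hk; simp at hk
  | cons c rest ih =>
      intro p acc oi k hk
      have hzip : (p :: c :: rest).zip (c :: rest) = (p, c) :: (c :: rest).zip rest := by
        simp [List.zip]
      rw [hzip]
      have hb : pvBuildMap (c :: rest) oi (pvIsWS p) =
          if pvIsWS c && pvIsWS p then pvBuildMap rest (oi+1) true
          else oi :: pvBuildMap rest (oi+1) (pvIsWS c) := by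
        by_cases h1 : pvIsWS c = true
        · by_cases h2 : pvIsWS p = true <;> simp [pvBuildMap, h1, h2]
        · simp only [Bool.not_eq_true] at h1
          simp [pvBuildMap, h1]
      rw [hb]
      by_cases hred : (pvIsWS c && pvIsWS p) = true
      · have hws : pvIsWS c = true := (Bool.and_eq_true _ _ |>.mp hred).1
        rw [if_pos hred]
        have hstep : pvPrefLoop ((p, c) :: (c :: rest).zip rest) acc =
            acc :: pvPrefLoop ((c :: rest).zip rest) acc := by
          simp [pvPrefLoop, hred]
        rw [hstep]
        cases k with
        | zero =>
            have hz : (pvBuildMap rest (oi+1) true).countP (fun m => decide (m ≤ oi + ((0:Nat) : Int))) = 0 := by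
              refine List.countP_eq_zero.mpr ?_
              intro m hm
              have := pvBuildMap_lb rest (oi+1) true m hm
              simp only [decide_eq_true_eq]
              push_cast
              omega
            rw [List.getD_cons_zero, hz]
            simp
        | succ k' =>
            have hk' : k' < rest.length := by simpa using hk
            have hih := ih c acc (oi+1) k' hk'
            rw [hws] at hih
            rw [List.getD_cons_succ, hih,
              List.countP_congr (fun m _ => by rw [pvDecideShift oi k' m])]
      · rw [if_neg hred]
        simp only [Bool.not_eq_true] at hred
        have hstep : pvPrefLoop ((p, c) :: (c :: rest).zip rest) acc =
            (acc + 1) :: pvPrefLoop ((c :: rest).zip rest) (acc + 1) := by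
          simp [pvPrefLoop, hred]
        rw [hstep]
        cases k with
        | zero =>
            have hz : (pvBuildMap rest (oi+1) (pvIsWS c)).countP (fun m => decide (m ≤ oi + ((0:Nat) : Int))) = 0 := by
              refine List.countP_eq_zero.mpr ?_
              intro m hm
              have := pvBuildMap_lb rest (oi+1) (pvIsWS c) m hm
              simp only [decide_eq_true_eq]
              push_cast
              omega
            rw [List.getD_cons_zero, List.countP_cons, hz]
            simp
        | succ k' =>
            have hk' : k' < rest.length := by simpa using hk
            have hih := ih c (acc + 1) (oi+1) k' hk'
            rw [List.getD_cons_succ, hih,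
              List.countP_congr (fun m _ => by rw [pvDecideShift oi k' m]),
              List.countP_cons]
            have hoi : (decide (oi ≤ oi + ((k' + 1 : Nat) : Int))) = true := by
              simp only [decide_eq_true_eq]
              push_cast
              omega
            rw [hoi]
            simp only [if_true]
            push_cast
            ring

-- threshold characterization on a strictly sorted list
theorem pvCountP_threshold : ∀ (M : List Int), M.Pairwise (· < ·) → ∀ (p : Nat) (x : Int),
    p < M.length → (p + 1 ≤ M.countP (fun m => decide (m ≤ x)) ↔ M.getD p 0 ≤ x) := by
  intro M
  induction M with
  | nil => intro _ p x hp; simp at hp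
  | cons a rest ih =>
      intro hs p x hp
      have hrest := (List.pairwise_cons.mp hs).2
      have hlt := (List.pairwise_cons.mp hs).1
      by_cases hax : a ≤ x
      · have : (a :: rest).countP (fun m => decide (m ≤ x)) = rest.countP (fun m => decide (m ≤ x)) + 1 := by
          simp [hax]
        cases p with
        | zero => simp [this, hax]
        | succ p' =>
            have hp' : p' < rest.length := by simpa using hp
            rw [this]
            simp only [List.getD_cons_succ]
            rw [← ih hrest p' x hp']
            omega
      · have hall : ∀ m ∈ a :: rest, ¬ (decide (m ≤ x) = true) := by
          intro m hm
          rcases List.mem_cons.mp hm with h' | h'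
          · subst h'; simpa using hax
          · have := hlt m h'
            simp only [decide_eq_true_eq]
            omega
        have hz : (a :: rest).countP (fun m => decide (m ≤ x)) = 0 :=
          List.countP_eq_zero.mpr (fun m hm => by simpa using hall m hm)
        rw [hz]
        constructor
        · omega
        · intro hgd
          exfalso
          cases p with
          | zero => simp at hgd; omega
          | succ p' =>
              have hp' : p' < rest.length := by simpa using hp
              have hmem : rest.getD p' 0 ∈ rest := by
                rw [List.getD_eq_getElem _ _ hp']
                exact List.getElem_mem hp'
              have := hlt _ hmem
              simp only [List.getD_cons_succ] at hgd
              omega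

-- binary search over a monotone threshold predicate returns the boundary m
theorem pvBSearch_eq_aux (pref : List Int) (t : Int) (m : Nat) : ∀ (d lo hi : Nat),
    hi - lo ≤ d → lo ≤ m → m ≤ hi →
    (∀ i, lo ≤ i → i ≤ hi → (t ≤ pref.getD (i + 1) 0 ↔ m ≤ i)) →
    pvBSearch pref t lo hi = m := by
  intro d
  induction d with
  | zero =>
      intro lo hi hd hlm hmh hiff
      unfold pvBSearch
      rw [if_neg (by omega)]
      omega
  | succ d' ihd =>
      intro lo hi hd hlm hmh hiff
      unfold pvBSearch
      by_cases hlh : lo < hi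
      · rw [if_pos hlh]
        have hmid1 : lo ≤ (lo + hi) / 2 := by omega
        have hmid2 : (lo + hi) / 2 < hi := by omega
        by_cases hpred : t ≤ pref.getD ((lo + hi) / 2 + 1) 0
        · rw [if_pos hpred]
          have hm : m ≤ (lo + hi) / 2 := (hiff _ hmid1 (le_of_lt hmid2)).mp hpred
          exact ihd lo ((lo + hi) / 2) (by omega) hlm hm
            (fun i h1 h2 => hiff i h1 (by omega))
        · rw [if_neg hpred]
          have hm : ¬ m ≤ (lo + hi) / 2 := fun h => hpred ((hiff _ hmid1 (le_of_lt hmid2)).mpr h)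
          exact ihd ((lo + hi) / 2 + 1) hi (by omega) (by omega) hmh
            (fun i h1 h2 => hiff i (by omega) h2)
      · rw [if_neg hlh]
        omega

theorem pvBSearch_eq (pref : List Int) (t : Int) (m lo hi : Nat)
    (hlm : lo ≤ m) (hmh : m ≤ hi)
    (hiff : ∀ i, lo ≤ i → i ≤ hi → (t ≤ pref.getD (i + 1) 0 ↔ m ≤ i)) :
    pvBSearch pref t lo hi = m :=
  pvBSearch_eq_aux pref t m (hi - lo) lo hi (le_refl _) hlm hmh hiff

-- ===== VERDICT (by name: the statement is the Claim_ definition above) =====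
theorem map_collapsed_to_orig_py_spec : Claim_equal_map_collapsed_to_orig_py := by
  intro original pos _
  unfold Spec_map_collapsed_to_orig_py map_collapsed_to_orig_py map_collapsed_to_orig_py_alt
  rw [pvALoop_eq_getElem]
  simp only [sub_zero]
  set cs := original.toList with hcs
  set n := cs.length with hn
  set M := pvBuildMap cs 0 false with hM
  set pref : List Int := 0 :: pvPrefLoop ((Char.ofNat 0 :: cs).zip cs) 0 with hpref
  have hws0 : pvIsWS (Char.ofNat 0) = false := by decide
  have hgetPref : ∀ k, k < n → pref.getD (k + 1) 0 =
      (M.countP (fun m => decide (m ≤ (k : Int))) : Int) := by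
    intro k hk
    have := pvPrefLoop_countP cs (Char.ofNat 0) 0 0 k hk
    rw [hws0] at this
    simpa [hpref, hM] using this
  have hMub : ∀ m ∈ M, m < (n : Int) := by
    intro m hm
    have := pvBuildMap_ub cs 0 false m hm
    omega
  have hMlb : ∀ m ∈ M, 0 ≤ m := fun m hm => pvBuildMap_lb cs 0 false m hm
  have hguard : pref.getD n 0 = (M.length : Int) := by
    cases hnz : n with
    | zero =>
        have : cs = [] := List.length_eq_zero_iff.mp (hn ▸ hnz)
        simp [hpref, this, pvPrefLoop, hM, pvBuildMap]
    | succ n' =>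
        have h1 : n' < n := by omega
        have := hgetPref n' h1
        rw [this]
        congr 1
        refine List.countP_eq_length.mpr ?_
        intro m hm
        have := hMub m hm
        simp only [decide_eq_true_eq]
        omega
  rw [hguard]
  by_cases h0 : 0 ≤ pos
  · rw [if_pos h0]
    by_cases h1 : pos < (M.length : Int)
    · have hp : pos.toNat < M.length := by omega
      rw [List.getElem?_eq_getElem hp, if_pos ⟨h0, h1⟩]
      have hvmem : M[pos.toNat] ∈ M := List.getElem_mem hp
      have hv0 : 0 ≤ M[pos.toNat] := hMlb _ hvmem
      have hvn : M[pos.toNat] < (n : Int) := hMub _ hvmem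
      have hn1 : 1 ≤ n := by omega
      have hbs : pvBSearch pref (pos + 1) 0 (n - 1) = M[pos.toNat].toNat := by
        refine pvBSearch_eq pref (pos + 1) M[pos.toNat].toNat 0 (n - 1) (Nat.zero_le _) (by omega) ?_
        intro i _ hih
        have hin : i < n := by omega
        rw [hgetPref i hin]
        rw [← List.getD_eq_getElem M 0 hp] at hv0 hvn ⊢
        have hth := pvCountP_threshold M (pvBuildMap_sorted cs 0 false) pos.toNat ((i : Nat) : Int) hp
        constructor
        · intro hle
          have h2 : pos.toNat + 1 ≤ M.countP (fun m => decide (m ≤ ((i : Nat) : Int))) := by omega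
          have h3 := hth.mp h2
          omega
        · intro hle
          have h2 : M.getD pos.toNat 0 ≤ ((i : Nat) : Int) := by omega
          have h3 := hth.mpr h2
          omega
      simp only [hbs]
      omega
    · rw [List.getElem?_eq_none (by omega)]
      rw [if_neg (by omega)]
  · rw [if_neg h0, if_neg (by omega)]
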